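-- pv_equiv track=rewrite | github.com/anjli01/Python-Functions | 31.py | find_string_rotation_count
-- ===== SOURCE A (Python) =====
-- def find_string_rotation_count(text: str) -> int:
--     """Computes the minimum number of left rotations required to get the same string.
--
--     Args:
--         text: The input string.
--
--     Returns:
--         The minimum number of rotations.
--     """
--     if not text:
--         return 0
--
--     temp_str = text + text
--     n = len(text)
--     for i in range(1, n + 1):
--         substring = temp_str[i : i + n]
--         if text == substring:
--             return i
--     return n # Should not be reached if text is not empty
-- ===== SOURCE B (Python) =====
-- def find_string_rotation_count(text: str) -> int:
--     """Minimum left rotations giving the same string = the least divisor d of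
--     len(text) such that text is a repetition of its first d characters."""
--     n = len(text)
--     for d in range(1, n + 1):
--         if n % d == 0 and text == text[:d] * (n // d):
--             return d
--     return 0  # only reached for the empty string
-- ===== Notes on version B (the rewrite author's own statement) =====
-- stated objective: faster
-- what changed: A scans all n candidate rotations, slicing an n-character window out of text+text and comparing at every index; B never builds the doubled string: it uses the number-theoretic fact that the minimal fixing rotation is the least divisor d of n for which the string is a repetition of its first d characters, so the O(n) comparison runs only at the d(n) divisors of n.
import Mathlib
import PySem

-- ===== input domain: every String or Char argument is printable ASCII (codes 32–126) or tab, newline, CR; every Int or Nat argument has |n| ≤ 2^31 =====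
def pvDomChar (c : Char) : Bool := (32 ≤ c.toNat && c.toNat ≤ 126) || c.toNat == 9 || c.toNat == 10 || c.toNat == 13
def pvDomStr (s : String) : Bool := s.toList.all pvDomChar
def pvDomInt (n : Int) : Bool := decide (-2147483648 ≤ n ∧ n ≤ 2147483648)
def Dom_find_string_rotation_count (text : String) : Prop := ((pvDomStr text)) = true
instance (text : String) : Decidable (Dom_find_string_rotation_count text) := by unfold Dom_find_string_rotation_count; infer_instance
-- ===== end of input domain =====

-- B replaces A's scan of all n rotations (each sliced out of text+text and compared)
-- by a check of only the divisors d of n against a repetition of the first d characters;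
-- objective: faster (the O(n) comparison runs only at the divisors of n).

-- ===== PORT A =====
-- A's loop 'for i in range(1, n+1): if text == temp_str[i:i+n]: return i' / 'return n'
def pvAGo (t : List Char) (n : Nat) : List Int → Int
  | [] => (n : Int)
  | i :: rest =>
    if PySem.List.slice (t ++ t) (some i) (some (i + (n : Int))) = t then i
    else pvAGo t n rest

def find_string_rotation_count (text : String) : Int :=
  if text.toList = [] then 0
  else
    pvAGo text.toList text.toList.length
      (PySem.List.pyRange 1 ((text.toList.length : Int) + 1) 1)

-- ===== PORT B =====
-- Source B: for d in range(1, n+1): if n % d == 0 and text == text[:d] * (n // d): return d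
-- pvRepeat u k is Python's string repetition u * k (ported by hand; exact for k ≥ 0)
def pvRepeat (u : List Char) : Nat → List Char
  | 0 => []
  | k + 1 => u ++ pvRepeat u k

def pvBGo (t : List Char) (n : Nat) : List Int → Int
  | [] => 0
  | d :: rest =>
    if PySem.Int.mod (n : Int) d = 0 ∧
        t = pvRepeat (PySem.List.slice t none (some d)) (PySem.Int.floordiv (n : Int) d).toNat
    then d
    else pvBGo t n rest

def find_string_rotation_count_alt (text : String) : Int :=
  pvBGo text.toList text.toList.length
    (PySem.List.pyRange 1 ((text.toList.length : Int) + 1) 1)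

-- ===== PRECONDITION & SPEC =====
def Spec_find_string_rotation_count (text : String) (out : Int) : Prop := out = find_string_rotation_count_alt text
instance (text : String) (out : Int) : Decidable (Spec_find_string_rotation_count text out) := by unfold Spec_find_string_rotation_count; infer_instance

-- ===== CLAIM (what is proved, stated in full; the proofs are below) =====
def Claim_equal_find_string_rotation_count : Prop := ∀ (text : String), Dom_find_string_rotation_count text → Spec_find_string_rotation_count text (find_string_rotation_count text)

-- ===== LEMMAS AND PROOFS =====

theorem pvRepeat_length (u : List Char) (k : Nat) : (pvRepeat u k).length = k * u.length := by
  induction k with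
  | zero => simp [pvRepeat]
  | succ k ih => simp [pvRepeat, ih]; ring

theorem pvRepeat_comm (u : List Char) (k : Nat) :
    pvRepeat u k ++ u = u ++ pvRepeat u k := by
  induction k with
  | zero => simp [pvRepeat]
  | succ k ih => simp only [pvRepeat, List.append_assoc, ih]

-- A's slice of the doubled string is the left rotation by i, for i ≤ n.
theorem pvSlice_eq_rotate (t : List Char) (i : Nat) (hi : i ≤ t.length) :
    PySem.List.slice (t ++ t) (some (i : Int)) (some ((i : Int) + (t.length : Int)))
      = t.rotate i := by
  rw [PySem.List.slice_natCast_add, List.drop_append_of_le_length hi,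
      List.rotate_eq_drop_append_take hi, List.take_append]
  congr 1
  · exact List.take_of_length_le (by simp)
  · congr 1; simp; omega

-- a d-periodic string of length k*d is its first block repeated k times
theorem pvRep_of_rotate (d : Nat) (_hd : 0 < d) :
    ∀ (k : Nat) (t : List Char), t.length = k * d → t.rotate d = t →
      t = pvRepeat (t.take d) k := by
  intro k
  induction k with
  | zero =>
    intro t hlen _
    simp at hlen
    simp [hlen, pvRepeat]
  | succ k ih =>
    intro t hlen hrot
    have hdle : d ≤ t.length := by rw [hlen]; nlinarith
    have heq : t.drop d ++ t.take d = t := by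
      rw [← List.rotate_eq_drop_append_take hdle]; exact hrot
    by_cases hk : k = 0
    · subst hk
      have : t.take d = t := List.take_of_length_le (by omega)
      simp [pvRepeat, this]
    · have hk1 : 1 ≤ k := by omega
      have hlen' : (t.drop d).length = k * d := by simp [hlen]; ring_nf; omega
      have hdle' : d ≤ (t.drop d).length := by rw [hlen']; nlinarith
      -- t.take d is also the first block of t.drop d
      have hu : (t.drop d).take d = t.take d := by
        conv_rhs => rw [← heq]
        rw [List.take_append]
        have hdd : d ≤ t.length - d := by simpa using hdle'
        have h0 : d - (t.length - d) = 0 := by omega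
        simp [h0]
      -- t.drop d is itself d-periodic
      have hrot' : (t.drop d).rotate d = t.drop d := by
        rw [List.rotate_eq_drop_append_take hdle', hu]
        conv_rhs => rw [← heq]
        rw [List.drop_append_of_le_length hdle']
      have := ih (t.drop d) hlen' hrot'
      rw [hu] at this
      calc t = t.take d ++ t.drop d := (List.take_append_drop d t).symm
        _ = t.take d ++ pvRepeat (t.take d) k := by rw [← this]
        _ = pvRepeat (t.take d) (k + 1) := rfl

-- conversely a repetition of a block of length d is fixed by rotation by d
theorem pvRotate_of_rep (u : List Char) (k : Nat) (hk : 0 < k) :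
    (pvRepeat u k).rotate u.length = pvRepeat u k := by
  obtain ⟨k', rfl⟩ : ∃ k', k = k' + 1 := ⟨k - 1, by omega⟩
  have hle : u.length ≤ (pvRepeat u (k' + 1)).length := by
    rw [pvRepeat_length]; nlinarith
  rw [List.rotate_eq_drop_append_take hle]
  show (u ++ pvRepeat u k').drop u.length ++ (u ++ pvRepeat u k').take u.length
        = pvRepeat u (k' + 1)
  rw [List.drop_left, List.take_left, pvRepeat_comm]
  rfl

-- B's loop condition at a positive index i, in arithmetic form
theorem pvCB_iff (t : List Char) (i : Nat) :
    (PySem.Int.mod (t.length : Int) (i : Int) = 0 ∧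
      t = pvRepeat (PySem.List.slice t none (some (i : Int)))
            (PySem.Int.floordiv (t.length : Int) (i : Int)).toNat)
      ↔ (t.length % i = 0 ∧ t = pvRepeat (t.take i) (t.length / i)) := by
  rw [PySem.Int.mod_natCast, PySem.Int.floordiv_natCast, PySem.List.slice_to_natCast,
      Int.toNat_natCast, Int.natCast_eq_zero]

-- A's loop returns m when m is the least index ≥ 1 whose rotation restores t.
theorem pvAGo_eq (t : List Char) (m : Nat)
    (hm : m ≤ t.length)
    (hP : t.rotate m = t)
    (hmin : ∀ i : Nat, 1 ≤ i → i < m → ¬ t.rotate i = t) :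
    ∀ k a : Nat, m - a = k → 1 ≤ a → a ≤ m →
      pvAGo t t.length (PySem.List.pyRange (a : Int) ((t.length : Int) + 1) 1) = (m : Int) := by
  intro k
  induction k using Nat.strong_induction_on with
  | _ k ih =>
    intro a hk ha1 ham
    rw [PySem.List.pyRange_one_cons (by omega : (a : Int) < (t.length : Int) + 1)]
    unfold pvAGo
    by_cases hc : a = m
    · subst hc
      rw [if_pos (by rw [pvSlice_eq_rotate t a hm]; exact hP)]
    · have hane : ¬ t.rotate a = t := hmin a ha1 (by omega)
      rw [if_neg (by rw [pvSlice_eq_rotate t a (by omega)]; exact hane)]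
      have : ((a : Int) + 1) = ((a + 1 : Nat) : Int) := by push_cast; ring
      rw [this]
      exact ih (m - (a + 1)) (by omega) (a + 1) rfl (by omega) (by omega)

-- B's loop returns m under the analogous first-hit hypotheses.
theorem pvBGo_eq (t : List Char) (m : Nat)
    (hm : m ≤ t.length)
    (hP : t.length % m = 0 ∧ t = pvRepeat (t.take m) (t.length / m))
    (hmin : ∀ i : Nat, 1 ≤ i → i < m →
      ¬ (t.length % i = 0 ∧ t = pvRepeat (t.take i) (t.length / i))) :
    ∀ k a : Nat, m - a = k → 1 ≤ a → a ≤ m →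
      pvBGo t t.length (PySem.List.pyRange (a : Int) ((t.length : Int) + 1) 1) = (m : Int) := by
  intro k
  induction k using Nat.strong_induction_on with
  | _ k ih =>
    intro a hk ha1 ham
    rw [PySem.List.pyRange_one_cons (by omega : (a : Int) < (t.length : Int) + 1)]
    unfold pvBGo
    by_cases hc : a = m
    · subst hc
      rw [if_pos ((pvCB_iff t a).mpr hP)]
    · rw [if_neg (fun h => hmin a ha1 (by omega) ((pvCB_iff t a).mp h))]
      have : ((a : Int) + 1) = ((a + 1 : Nat) : Int) := by push_cast; ring
      rw [this]
      exact ih (m - (a + 1)) (by omega) (a + 1) rfl (by omega) (by omega)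

theorem find_string_rotation_count_eq (text : String) :
    find_string_rotation_count text = find_string_rotation_count_alt text := by
  unfold find_string_rotation_count find_string_rotation_count_alt
  by_cases h : text.toList = []
  · rw [if_pos h, h]
    simp [PySem.List.pyRange, pvBGo]
  · rw [if_neg h]
    set t := text.toList with ht
    set n := t.length with hn
    have hn1 : 1 ≤ n := by rw [hn]; exact List.length_pos_of_ne_nil h
    -- m = the least i ≥ 1 with t.rotate i = t (n itself qualifies)
    have hex : ∃ i, 1 ≤ i ∧ t.rotate i = t := ⟨n, hn1, by rw [hn]; exact t.rotate_length⟩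
    set m := Nat.find hex with hmdef
    obtain ⟨hm1, hmrot⟩ := Nat.find_spec hex
    have hmin : ∀ i : Nat, 1 ≤ i → i < m → ¬ t.rotate i = t := by
      intro i hi1 him hrot
      exact Nat.find_min hex him ⟨hi1, hrot⟩
    have hmn : m ≤ n := Nat.find_le ⟨hn1, by rw [hn]; exact t.rotate_length⟩
    -- every multiple of m also fixes t
    have hmul : ∀ k : Nat, t.rotate (k * m) = t := by
      intro k
      induction k with
      | zero => simp
      | succ k ih =>
        have : (k + 1) * m = k * m + m := by ring
        rw [this, ← List.rotate_rotate, ih, hmrot]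
    -- hence m divides n
    have hdvd : m ∣ n := by
      have hr : t.rotate (n % m) = t := by
        have hsplit : n / m * m + n % m = n := by
          rw [Nat.mul_comm (n / m) m]; exact Nat.div_add_mod n m
        have : t.rotate n = t := by rw [hn]; exact t.rotate_length
        rw [← hsplit, ← List.rotate_rotate, hmul (n / m)] at this
        exact this
      by_contra hnd
      have hr1 : 1 ≤ n % m := by
        rcases Nat.eq_zero_or_pos (n % m) with h0 | h0
        · exact absurd (Nat.dvd_of_mod_eq_zero h0) hnd
        · omega
      exact hmin (n % m) hr1 (Nat.mod_lt n (by omega)) hr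
    -- B's condition holds at m …
    have hPB : n % m = 0 ∧ t = pvRepeat (t.take m) (n / m) := by
      refine ⟨Nat.mod_eq_zero_of_dvd hdvd, ?_⟩
      exact pvRep_of_rotate m (by omega) (n / m) t
        (by rw [← hn, Nat.div_mul_cancel hdvd]) hmrot
    -- … and fails strictly below m
    have hminB : ∀ i : Nat, 1 ≤ i → i < m →
        ¬ (n % i = 0 ∧ t = pvRepeat (t.take i) (n / i)) := by
      rintro i hi1 him ⟨hmod, hrep⟩
      have hilen : (t.take i).length = i := by
        rw [List.length_take]; omega
      have hpos : 0 < n / i := Nat.div_pos (by omega) (by omega)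
      have h2 := pvRotate_of_rep (t.take i) (n / i) hpos
      rw [hilen] at h2
      have : t.rotate i = t := by
        conv_lhs => rw [hrep]
        rw [h2]
        exact hrep.symm
      exact hmin i hi1 him this
    -- both loops therefore return m
    have hA := pvAGo_eq t m hmn hmrot hmin (m - 1) 1 rfl le_rfl hm1
    have hB := pvBGo_eq t m hmn hPB hminB (m - 1) 1 rfl le_rfl hm1
    have h1 : ((1 : Nat) : Int) = (1 : Int) := by norm_num
    rw [h1] at hA hB
    rw [← hn] at hA hB
    rw [hA, hB]

-- ===== VERDICT (by name: the statement is the Claim_ definition above) =====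
theorem find_string_rotation_count_spec : Claim_equal_find_string_rotation_count := by
  intro text _
  unfold Spec_find_string_rotation_count
  exact find_string_rotation_count_eq text
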